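-- pv_equiv track=rewrite | github.com/SohamWalam11/AMD | backend/hip_generator.py | convert_cuda_to_hip
-- ===== SOURCE A (Python) =====
-- from typing import Dict, List
--
-- def convert_cuda_to_hip(cuda_code: str, warnings: List[str]) -> str:
--     """Basic CUDA-to-HIP conversion for common APIs and launch wrappers."""
--     replacements = {
--         "#include <cuda_runtime.h>": "#include <hip/hip_runtime.h>",
--         "cudaMalloc": "hipMalloc",
--         "cudaFree": "hipFree",
--         "cudaMemcpy": "hipMemcpy",
--         "cudaMemset": "hipMemset",
--         "cudaDeviceSynchronize": "hipDeviceSynchronize",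
--         "cudaGetDeviceProperties": "hipGetDeviceProperties",
--         "cudaDeviceProp": "hipDeviceProp_t",
--         "cudaError_t": "hipError_t",
--         "cudaSuccess": "hipSuccess",
--         "cudaStream_t": "hipStream_t",
--         "cudaStreamCreate": "hipStreamCreate",
--         "cudaStreamDestroy": "hipStreamDestroy",
--         "cudaStreamSynchronize": "hipStreamSynchronize",
--     }
--
--     hip_code = cuda_code
--     for source, target in replacements.items():
--         hip_code = hip_code.replace(source, target)
--
--     if "hip/hip_runtime.h" not in hip_code:
--         hip_code = '#include <hip/hip_runtime.h>\n' + hip_code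
--
--     issue_lines = [f"// ⚠️ WARNING: {warning}" for warning in warnings]
--     banner = "\n".join(issue_lines)
--     if banner:
--         hip_code = f"{banner}\n{hip_code}"
--
--     return hip_code
-- ===== SOURCE B (Python) =====
-- import re
-- from typing import List
--
-- _REPLACEMENTS = {
--     "#include <cuda_runtime.h>": "#include <hip/hip_runtime.h>",
--     "cudaMalloc": "hipMalloc",
--     "cudaFree": "hipFree",
--     "cudaMemcpy": "hipMemcpy",
--     "cudaMemset": "hipMemset",
--     "cudaDeviceSynchronize": "hipDeviceSynchronize",
--     "cudaGetDeviceProperties": "hipGetDeviceProperties",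
--     "cudaDeviceProp": "hipDeviceProp_t",
--     "cudaError_t": "hipError_t",
--     "cudaSuccess": "hipSuccess",
--     "cudaStream_t": "hipStream_t",
--     "cudaStreamCreate": "hipStreamCreate",
--     "cudaStreamDestroy": "hipStreamDestroy",
--     "cudaStreamSynchronize": "hipStreamSynchronize",
-- }
-- _RX = re.compile("|".join(re.escape(k) for k in _REPLACEMENTS))
--
--
-- def convert_cuda_to_hip(cuda_code: str, warnings: List[str]) -> str:
--     """One-pass CUDA-to-HIP conversion: a single compiled alternation regex."""
--     hip_code = _RX.sub(lambda m: _REPLACEMENTS[m.group(0)], cuda_code)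
--     if "hip/hip_runtime.h" not in hip_code:
--         hip_code = "#include <hip/hip_runtime.h>\n" + hip_code
--     if warnings:
--         hip_code = "\n".join("// ⚠️ WARNING: " + w for w in warnings) + "\n" + hip_code
--     return hip_code
-- ===== Notes on version B (the rewrite author's own statement) =====
-- stated objective: idiomatic
-- what changed: A rewrites the code with 14 sequential whole-string str.replace passes (one per CUDA API name); B compiles the replacement dict once into a single alternation regex and rewrites everything in one left-to-right re.sub pass.
import Mathlib
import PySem

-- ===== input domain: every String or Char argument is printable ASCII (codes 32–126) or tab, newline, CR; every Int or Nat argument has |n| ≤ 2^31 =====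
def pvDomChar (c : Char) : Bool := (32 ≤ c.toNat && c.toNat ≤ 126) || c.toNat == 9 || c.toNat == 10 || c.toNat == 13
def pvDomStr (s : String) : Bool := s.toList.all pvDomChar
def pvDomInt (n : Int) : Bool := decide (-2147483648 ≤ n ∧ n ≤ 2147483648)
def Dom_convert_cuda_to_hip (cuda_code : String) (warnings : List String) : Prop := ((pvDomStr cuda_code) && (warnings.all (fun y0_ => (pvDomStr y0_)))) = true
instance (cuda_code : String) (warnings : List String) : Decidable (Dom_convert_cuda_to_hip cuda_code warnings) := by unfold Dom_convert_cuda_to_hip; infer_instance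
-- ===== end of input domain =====

-- B replaces A's 14 sequential str.replace passes by ONE left-to-right scan (a single compiled
-- alternation regex in Source B); same return value on Pre_ (inputs without the overlap "cudaMallocuda").

-- ===== PORT A =====
-- A's replacements dict (14 distinct literal keys), in insertion order.
def pvReplacementsA : List (String × String) := [
  ("#include <cuda_runtime.h>", "#include <hip/hip_runtime.h>"),
  ("cudaMalloc", "hipMalloc"),
  ("cudaFree", "hipFree"),
  ("cudaMemcpy", "hipMemcpy"),
  ("cudaMemset", "hipMemset"),
  ("cudaDeviceSynchronize", "hipDeviceSynchronize"),
  ("cudaGetDeviceProperties", "hipGetDeviceProperties"),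
  ("cudaDeviceProp", "hipDeviceProp_t"),
  ("cudaError_t", "hipError_t"),
  ("cudaSuccess", "hipSuccess"),
  ("cudaStream_t", "hipStream_t"),
  ("cudaStreamCreate", "hipStreamCreate"),
  ("cudaStreamDestroy", "hipStreamDestroy"),
  ("cudaStreamSynchronize", "hipStreamSynchronize")]

def convert_cuda_to_hip (cuda_code : String) (warnings : List String) : String :=
  -- for source, target in replacements.items(): hip_code = hip_code.replace(source, target)
  let hip_code := pvReplacementsA.foldl (fun s pt => PySem.Str.replace s pt.1 pt.2) cuda_code
  let hip_code := if PySem.Str.isIn "hip/hip_runtime.h" hip_code then hip_code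
                  else PySem.Str.join "" ["#include <hip/hip_runtime.h>\n", hip_code]
  let issue_lines := warnings.map (fun w => PySem.Str.join "" ["// ⚠️ WARNING: ", w])
  let banner := PySem.Str.join "\n" issue_lines
  if banner ≠ "" then PySem.Str.join "" [banner, "\n", hip_code] else hip_code

-- ===== PORT B =====
-- B's table: the same 14 literal pairs, compiled in Source B into one alternation regex.
-- pvScan is the exact semantics of _RX.sub for a literal-alternation pattern: one left-to-right
-- scan; at each position the first listed alternative that matches is substituted and the scan
-- resumes after the inserted text (no PySem regex primitive exists, so it is ported by hand).
def pvTableB : List (List Char × List Char) := [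
  ("#include <cuda_runtime.h>".toList, "#include <hip/hip_runtime.h>".toList),
  ("cudaMalloc".toList, "hipMalloc".toList),
  ("cudaFree".toList, "hipFree".toList),
  ("cudaMemcpy".toList, "hipMemcpy".toList),
  ("cudaMemset".toList, "hipMemset".toList),
  ("cudaDeviceSynchronize".toList, "hipDeviceSynchronize".toList),
  ("cudaGetDeviceProperties".toList, "hipGetDeviceProperties".toList),
  ("cudaDeviceProp".toList, "hipDeviceProp_t".toList),
  ("cudaError_t".toList, "hipError_t".toList),
  ("cudaSuccess".toList, "hipSuccess".toList),
  ("cudaStream_t".toList, "hipStream_t".toList),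
  ("cudaStreamCreate".toList, "hipStreamCreate".toList),
  ("cudaStreamDestroy".toList, "hipStreamDestroy".toList),
  ("cudaStreamSynchronize".toList, "hipStreamSynchronize".toList)]

def pvScan (cs : List Char) : List Char :=
  match cs with
  | [] => []
  | c :: t =>
    match h : pvTableB.find? (fun pt => pt.1.isPrefixOf (c :: t)) with
    | some pt => pt.2 ++ pvScan ((c :: t).drop pt.1.length)
    | none => c :: pvScan t
termination_by cs.length
decreasing_by
  · have hm := List.mem_of_find?_eq_some h
    have h1 : ∀ q ∈ pvTableB, 1 ≤ q.1.length := by decide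
    have := h1 _ hm
    simp [List.length_drop]; omega
  · simp

def convert_cuda_to_hip_alt (cuda_code : String) (warnings : List String) : String :=
  let hip_code := String.ofList (pvScan cuda_code.toList)
  let hip_code := if PySem.Str.isIn "hip/hip_runtime.h" hip_code then hip_code
                  else PySem.Str.join "" ["#include <hip/hip_runtime.h>\n", hip_code]
  if warnings ≠ [] then
    PySem.Str.join "" [PySem.Str.join "\n" (warnings.map (fun w => PySem.Str.join "" ["// ⚠️ WARNING: ", w])), "\n", hip_code]
  else hip_code

-- ===== PRECONDITION & SPEC =====
-- Pre_ excludes inputs containing the substring "cudaMallocuda", on which two replacement matches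
-- overlap and A's sequential passes cascade (the 'c' of an inserted "hipMalloc" merges with the
-- following text into a new CUDA token that a later pass rewrites, e.g. "cudaMallocudaFree" ->
-- "hipMallohipFree") while B's single pass takes the leftmost match ("hipMallocudaFree") — an
-- unspecified overlapping-match corner on which either resolution is defensible.
def Pre_convert_cuda_to_hip (cuda_code : String) (warnings : List String) : Prop :=
  PySem.Str.isIn "cudaMallocuda" cuda_code = false
instance (cuda_code : String) (warnings : List String) : Decidable (Pre_convert_cuda_to_hip cuda_code warnings) := by unfold Pre_convert_cuda_to_hip; infer_instance

def pvWitness_convert_cuda_to_hip : String × List String :=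
  ("#include <cuda_runtime.h>\ncudaMalloc(&p, n);\ncudaDeviceSynchronize();", ["verify launch bounds"])

def Spec_convert_cuda_to_hip (cuda_code : String) (warnings : List String) (out : String) : Prop := out = convert_cuda_to_hip_alt cuda_code warnings
instance (cuda_code : String) (warnings : List String) (out : String) : Decidable (Spec_convert_cuda_to_hip cuda_code warnings out) := by unfold Spec_convert_cuda_to_hip; infer_instance

-- ===== CLAIM (what is proved, stated in full; the proofs are below) =====
def Claim_equal_convert_cuda_to_hip : Prop := ∀ (cuda_code : String) (warnings : List String), Dom_convert_cuda_to_hip cuda_code warnings → Pre_convert_cuda_to_hip cuda_code warnings → Spec_convert_cuda_to_hip cuda_code warnings (convert_cuda_to_hip cuda_code warnings)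

-- ===== LEMMAS AND PROOFS =====

lemma pv_prefix_split (p a z : List Char) :
    p <+: a ++ z ↔ p <+: a ∨ (a <+: p ∧ p.drop a.length <+: z) := by
  constructor
  · intro h
    by_cases hle : p.length ≤ a.length
    · left
      have := List.prefix_iff_eq_take.mp h
      rw [List.take_append_of_le_length hle] at this
      rw [this]; exact List.take_prefix _ _
    · right
      have ha : a <+: p :=
        List.prefix_of_prefix_length_le (List.prefix_append a z) h (by omega)
      refine ⟨ha, ?_⟩
      obtain ⟨u, hu⟩ := ha
      obtain ⟨r, hr⟩ := h
      subst hu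
      rw [List.append_assoc, List.append_cancel_left_eq] at hr
      rw [List.drop_left]
      exact ⟨r, hr⟩
  · rintro (h | ⟨⟨u, hu⟩, hz⟩)
    · exact h.trans (List.prefix_append a z)
    · subst hu
      rw [List.drop_left] at hz
      obtain ⟨w, hw⟩ := hz
      exact ⟨w, by rw [List.append_assoc, hw]⟩

lemma pv_go_nil (old new : List Char) (f : Nat) :
    PySem.Chars.replace.go old new f [] [] = [] := by
  cases f <;> (rw [PySem.Chars.replace.go]; simp) <;> omega

lemma pv_go_acc (old new : List Char) (f : Nat) : ∀ (l acc : List Char),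
    PySem.Chars.replace.go old new f l acc = acc.reverse ++ PySem.Chars.replace.go old new f l [] := by
  induction f with
  | zero => intro l acc; rw [PySem.Chars.replace.go, PySem.Chars.replace.go]; simp
  | succ f ih =>
    intro l acc
    cases l with
    | nil =>
      rw [PySem.Chars.replace.go, PySem.Chars.replace.go]
      simp
      all_goals omega
    | cons c t =>
      rw [PySem.Chars.replace.go]
      conv_rhs => rw [PySem.Chars.replace.go]
      by_cases hp : old.isPrefixOf (c :: t)
      · simp only [hp, if_true]
        rw [ih _ (new.reverse ++ acc), ih _ (new.reverse ++ [])]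
        simp
      · simp only [hp, ite_false, Bool.false_eq_true]
        rw [ih _ (c :: acc), ih _ [c]]
        simp

lemma pv_go_irrel (old new : List Char) (hold : old ≠ []) :
    ∀ (n : Nat) (l : List Char), l.length ≤ n → ∀ (f₁ f₂ : Nat), l.length ≤ f₁ → l.length ≤ f₂ →
    PySem.Chars.replace.go old new f₁ l [] = PySem.Chars.replace.go old new f₂ l [] := by
  intro n
  induction n with
  | zero =>
    intro l hl f₁ f₂ _ _
    have : l = [] := by cases l <;> simp_all
    subst this
    rw [pv_go_nil, pv_go_nil]
  | succ n ih =>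
    intro l hl f₁ f₂ h1 h2
    cases l with
    | nil => rw [pv_go_nil, pv_go_nil]
    | cons c t =>
      have hone : 1 ≤ old.length := by cases old <;> simp_all
      cases f₁ with
      | zero => simp at h1
      | succ f₁ =>
        cases f₂ with
        | zero => simp at h2
        | succ f₂ =>
          rw [PySem.Chars.replace.go]
          conv_rhs => rw [PySem.Chars.replace.go]
          by_cases hp : old.isPrefixOf (c :: t)
          · simp only [hp, if_true]
            rw [pv_go_acc, pv_go_acc old new f₂]
            congr 1
            have hd : (List.drop old.length (c :: t)).length ≤ t.length := by
              simp only [List.length_drop, List.length_cons]; omega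
            simp only [List.length_cons] at hl h1 h2
            exact ih _ (by omega) _ _ (by omega) (by omega)
          · simp only [hp, ite_false, Bool.false_eq_true]
            rw [pv_go_acc, pv_go_acc old new f₂]
            congr 1
            simp only [List.length_cons] at hl h1 h2
            exact ih _ (by omega) _ _ (by omega) (by omega)

lemma pv_rep_nil (old new : List Char) (hold : old ≠ []) :
    PySem.Chars.replace [] old new = [] := by
  rw [PySem.Chars.replace]
  rw [if_neg (by simp [List.isEmpty_iff, hold])]
  exact pv_go_nil old new 0

lemma pv_rep_cons_nomatch (old new : List Char) (hold : old ≠ []) (c : Char) (t : List Char)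
    (h : ¬ old <+: (c :: t)) :
    PySem.Chars.replace (c :: t) old new = c :: PySem.Chars.replace t old new := by
  have hE : old.isEmpty = false := by simp [List.isEmpty_iff, hold]
  rw [PySem.Chars.replace, PySem.Chars.replace]
  simp only [hE, Bool.false_eq_true, if_false, List.length_cons]
  rw [PySem.Chars.replace.go]
  have hp : old.isPrefixOf (c :: t) = false := by
    rw [Bool.eq_false_iff]
    intro hc; exact h (List.isPrefixOf_iff_prefix.mp hc)
  simp only [hp, ite_false, Bool.false_eq_true]
  rw [pv_go_acc]
  simp

lemma pv_rep_match (old new s : List Char) (hold : old ≠ []) (h : old <+: s) :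
    PySem.Chars.replace s old new = new ++ PySem.Chars.replace (s.drop old.length) old new := by
  have hone : 1 ≤ old.length := by cases old <;> simp_all
  have hs : s ≠ [] := by
    rintro rfl; exact hold (List.prefix_nil.mp h)
  obtain ⟨c, t, rfl⟩ := List.exists_cons_of_ne_nil hs
  have hE : old.isEmpty = false := by simp [List.isEmpty_iff, hold]
  rw [PySem.Chars.replace, PySem.Chars.replace]
  simp only [hE, Bool.false_eq_true, if_false, List.length_cons]
  rw [PySem.Chars.replace.go]
  have hp : old.isPrefixOf (c :: t) = true := List.isPrefixOf_iff_prefix.mpr h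
  simp only [hp, if_true]
  rw [pv_go_acc]
  simp only [List.reverse_append, List.reverse_reverse, List.reverse_nil, List.nil_append,
    List.append_nil]
  congr 1
  exact pv_go_irrel old new hold t.length _
    (by simp only [List.length_drop, List.length_cons]; omega) _ _
    (by simp only [List.length_drop, List.length_cons]; omega)
    (by simp only [List.length_drop, List.length_cons]; omega)

lemma pv_rep_skip (old new : List Char) (hold : old ≠ []) :
    ∀ (a z : List Char), (∀ i < a.length, ¬ old <+: (a.drop i ++ z)) →
    PySem.Chars.replace (a ++ z) old new = a ++ PySem.Chars.replace z old new := by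
  intro a
  induction a with
  | nil => intro z _; simp
  | cons c a' ih =>
    intro z h
    have h0 : ¬ old <+: (c :: (a' ++ z)) := by
      have := h 0 (by simp)
      simpa using this
    rw [show (c :: a') ++ z = c :: (a' ++ z) from rfl]
    rw [pv_rep_cons_nomatch old new hold c _ h0]
    rw [ih z (fun i hi => by have := h (i + 1) (by simp; omega); simpa using this)]
    simp

lemma pv_pullback (old new : List Char) (hold : old ≠ []) :
    ∀ (n : Nat) (v cs : List Char),
    (∀ i < v.length, ¬ (v.drop i <+: new) ∧ ¬ (new <+: v.drop i)) →
    cs.length ≤ n → v <+: PySem.Chars.replace cs old new → v <+: cs := by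
  intro n
  induction n with
  | zero =>
    intro v cs hv hcs h
    have : cs = [] := by cases cs <;> simp_all
    subst this
    rwa [pv_rep_nil old new hold] at h
  | succ n ih =>
    intro v cs hv hcs h
    cases cs with
    | nil => rwa [pv_rep_nil old new hold] at h
    | cons c t =>
      have hone : 1 ≤ old.length := by cases old <;> simp_all
      by_cases hp : old <+: (c :: t)
      · rw [pv_rep_match old new _ hold hp] at h
        rcases (pv_prefix_split v new _).mp h with h1 | ⟨h2, _⟩
        · cases v with
          | nil => exact List.nil_prefix
          | cons d w => exact absurd h1 ((hv 0 (by simp)).1)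
        · cases v with
          | nil => exact List.nil_prefix
          | cons d w => exact absurd h2 ((hv 0 (by simp)).2)
      · rw [pv_rep_cons_nomatch old new hold c t hp] at h
        cases v with
        | nil => exact List.nil_prefix
        | cons d w =>
          rcases List.cons_prefix_cons.mp h with ⟨rfl, hw⟩
          have hv' : ∀ i < w.length, ¬ (w.drop i <+: new) ∧ ¬ (new <+: w.drop i) := by
            intro i hi
            have := hv (i + 1) (by simp; omega)
            simpa using this
          have hw' : w <+: t := ih w t hv' (by simp at hcs; omega) hw
          exact List.cons_prefix_cons.mpr ⟨rfl, hw'⟩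

def pvStep (s : List Char) (pt : List Char × List Char) : List Char := PySem.Chars.replace s pt.1 pt.2

lemma pv_fold_nomatch : ∀ (L : List (List Char × List Char)),
    (∀ pt ∈ L, pt.1 ≠ []) →
    (∀ pt ∈ L, ∀ qs ∈ L, ∀ i < pt.1.length, 0 < i →
      ¬ (pt.1.drop i <+: qs.2) ∧ ¬ (qs.2 <+: pt.1.drop i)) →
    ∀ (c : Char) (w : List Char), (∀ pt ∈ L, ¬ pt.1 <+: (c :: w)) →
    L.foldl pvStep (c :: w) = c :: L.foldl pvStep w := by
  intro L
  induction L with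
  | nil => intro _ _ c w _; simp
  | cons a L ih =>
    intro hne hc c w h
    simp only [List.foldl_cons]
    have ha : a.1 ≠ [] := hne a List.mem_cons_self
    have hstep : pvStep (c :: w) a = c :: pvStep w a := by
      rw [pvStep, pvStep]
      exact pv_rep_cons_nomatch a.1 a.2 ha c w (h a List.mem_cons_self)
    rw [hstep]
    apply ih (fun pt hpt => hne pt (List.mem_cons_of_mem _ hpt))
      (fun pt hpt qs hqs => hc pt (List.mem_cons_of_mem _ hpt) qs (List.mem_cons_of_mem _ hqs))
    intro pt hpt hcon
    have hp0 : ¬ pt.1 <+: c :: w := h pt (List.mem_cons_of_mem _ hpt)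
    obtain ⟨d, v, hdv⟩ := List.exists_cons_of_ne_nil (hne pt (List.mem_cons_of_mem _ hpt))
    rw [hdv] at hcon hp0
    rcases List.cons_prefix_cons.mp hcon with ⟨rfl, hv⟩
    have hvw : v <+: pvStep w a := hv
    have hpull : v <+: w := by
      apply pv_pullback a.1 a.2 ha w.length v w _ le_rfl hvw
      intro i hi
      have := hc pt (List.mem_cons_of_mem _ hpt) a List.mem_cons_self (1 + i)
        (by rw [hdv]; simp; omega) (by omega)
      rw [hdv] at this
      simpa [Nat.add_comm 1 i] using this
    exact hp0 (List.cons_prefix_cons.mpr ⟨rfl, hpull⟩)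

lemma pv_fold_keep_clean : ∀ (L : List (List Char × List Char)) (a : List Char),
    (∀ pt ∈ L, pt.1 ≠ []) →
    (∀ pt ∈ L, ∀ i < a.length, ¬ (pt.1 <+: a.drop i) ∧ ¬ (a.drop i <+: pt.1)) →
    ∀ (z : List Char), L.foldl pvStep (a ++ z) = a ++ L.foldl pvStep z := by
  intro L
  induction L with
  | nil => intro a _ _ z; simp
  | cons q L ih =>
    intro a hne hc z
    simp only [List.foldl_cons]
    have hq : q.1 ≠ [] := hne q List.mem_cons_self
    have hstep : pvStep (a ++ z) q = a ++ pvStep z q := by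
      rw [pvStep, pvStep]
      apply pv_rep_skip q.1 q.2 hq
      intro i hi hcon
      rcases (pv_prefix_split q.1 (a.drop i) z).mp hcon with h1 | ⟨h2, _⟩
      · exact (hc q List.mem_cons_self i hi).1 h1
      · exact (hc q List.mem_cons_self i hi).2 h2
    rw [hstep]
    exact ih a (fun pt hpt => hne pt (List.mem_cons_of_mem _ hpt))
      (fun pt hpt => hc pt (List.mem_cons_of_mem _ hpt)) (pvStep z q)

def pvUda : List Char := "uda".toList

lemma pv_uda_pres : ∀ (L : List (List Char × List Char)),
    (∀ pt ∈ L, pt.1 ≠ [] ∧ ∀ i < pvUda.length, ¬ (pvUda.drop i <+: pt.2) ∧ ¬ (pt.2 <+: pvUda.drop i)) →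
    ∀ (z : List Char), ¬ pvUda <+: z → ¬ pvUda <+: L.foldl pvStep z := by
  intro L
  induction L with
  | nil => intro _ z hz; simpa using hz
  | cons q L ih =>
    intro hp z hz
    simp only [List.foldl_cons]
    apply ih (fun pt hpt => hp pt (List.mem_cons_of_mem _ hpt))
    intro hcon
    exact hz (pv_pullback q.1 q.2 (hp q List.mem_cons_self).1 z.length pvUda z
      (hp q List.mem_cons_self).2 le_rfl hcon)

lemma pv_fold_keep_uda : ∀ (L : List (List Char × List Char)) (a : List Char),
    (∀ pt ∈ L, pt.1 ≠ []) →
    (∀ pt ∈ L, ∀ i < a.length, ¬ (pt.1 <+: a.drop i) ∧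
      ((a.drop i <+: pt.1) → pvUda <+: pt.1.drop (a.length - i))) →
    (∀ pt ∈ L, ∀ i < pvUda.length, ¬ (pvUda.drop i <+: pt.2) ∧ ¬ (pt.2 <+: pvUda.drop i)) →
    ∀ (z : List Char), ¬ pvUda <+: z → L.foldl pvStep (a ++ z) = a ++ L.foldl pvStep z := by
  intro L
  induction L with
  | nil => intro a _ _ _ z _; simp
  | cons q L ih =>
    intro a hne hc hu z hz
    simp only [List.foldl_cons]
    have hq : q.1 ≠ [] := hne q List.mem_cons_self
    have hstep : pvStep (a ++ z) q = a ++ pvStep z q := by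
      rw [pvStep, pvStep]
      apply pv_rep_skip q.1 q.2 hq
      intro i hi hcon
      rcases (pv_prefix_split q.1 (a.drop i) z).mp hcon with h1 | ⟨h2, h3⟩
      · exact (hc q List.mem_cons_self i hi).1 h1
      · have huda := (hc q List.mem_cons_self i hi).2 h2
        rw [List.length_drop] at h3
        exact hz (huda.trans h3)
    rw [hstep]
    have hz' : ¬ pvUda <+: pvStep z q := by
      intro hcon
      exact hz (pv_pullback q.1 q.2 hq z.length pvUda z (hu q List.mem_cons_self) le_rfl hcon)
    exact ih a (fun pt hpt => hne pt (List.mem_cons_of_mem _ hpt))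
      (fun pt hpt => hc pt (List.mem_cons_of_mem _ hpt))
      (fun pt hpt => hu pt (List.mem_cons_of_mem _ hpt)) (pvStep z q) hz'

def pvSeq (cs : List Char) : List Char := pvTableB.foldl pvStep cs
def pvGood (cs : List Char) : Prop := ¬ "cudaMallocuda".toList <:+: cs

lemma pvScan_some (c : Char) (t : List Char) (pt : List Char × List Char)
    (h : pvTableB.find? (fun q => q.1.isPrefixOf (c :: t)) = some pt) :
    pvScan (c :: t) = pt.2 ++ pvScan ((c :: t).drop pt.1.length) := by
  rw [pvScan, h]

lemma pvScan_none (c : Char) (t : List Char)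
    (h : pvTableB.find? (fun q => q.1.isPrefixOf (c :: t)) = none) :
    pvScan (c :: t) = c :: pvScan t := by
  rw [pvScan, h]

lemma pv_case_clean (p t : List Char) (L1 L2 : List (List Char × List Char))
    (hsplit : pvTableB = L1 ++ (p, t) :: L2) (hp : p ≠ [])
    (hne1 : ∀ pt ∈ L1, pt.1 ≠ []) (hne2 : ∀ pt ∈ L2, pt.1 ≠ [])
    (h1 : ∀ pt ∈ L1, ∀ i < p.length, ¬ (pt.1 <+: p.drop i) ∧ ¬ (p.drop i <+: pt.1))
    (h2 : ∀ pt ∈ L2, ∀ i < t.length, ¬ (pt.1 <+: t.drop i) ∧ ¬ (t.drop i <+: pt.1))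
    (z : List Char) : pvSeq (p ++ z) = t ++ pvSeq z := by
  unfold pvSeq
  rw [hsplit, List.foldl_append, List.foldl_append]
  rw [pv_fold_keep_clean L1 p hne1 h1 z]
  simp only [List.foldl_cons]
  have hstep : pvStep (p ++ L1.foldl pvStep z) (p, t)
      = t ++ pvStep (L1.foldl pvStep z) (p, t) := by
    rw [pvStep, pvStep]
    rw [pv_rep_match p t _ hp (List.prefix_append p _)]
    rw [List.drop_left]
  rw [hstep]
  rw [pv_fold_keep_clean L2 t hne2 h2 _]

lemma pv_case_uda (p t : List Char) (L1 L2 : List (List Char × List Char))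
    (hsplit : pvTableB = L1 ++ (p, t) :: L2) (hp : p ≠ [])
    (hne1 : ∀ pt ∈ L1, pt.1 ≠ []) (hne2 : ∀ pt ∈ L2, pt.1 ≠ [])
    (h1 : ∀ pt ∈ L1, ∀ i < p.length, ¬ (pt.1 <+: p.drop i) ∧ ¬ (p.drop i <+: pt.1))
    (hu1 : ∀ pt ∈ L1, pt.1 ≠ [] ∧ ∀ i < pvUda.length, ¬ (pvUda.drop i <+: pt.2) ∧ ¬ (pt.2 <+: pvUda.drop i))
    (hu0 : ∀ i < pvUda.length, ¬ (pvUda.drop i <+: t) ∧ ¬ (t <+: pvUda.drop i))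
    (h2 : ∀ pt ∈ L2, ∀ i < t.length, ¬ (pt.1 <+: t.drop i) ∧
      ((t.drop i <+: pt.1) → pvUda <+: pt.1.drop (t.length - i)))
    (hu2 : ∀ pt ∈ L2, ∀ i < pvUda.length, ¬ (pvUda.drop i <+: pt.2) ∧ ¬ (pt.2 <+: pvUda.drop i))
    (z : List Char) (hz : ¬ pvUda <+: z) : pvSeq (p ++ z) = t ++ pvSeq z := by
  unfold pvSeq
  rw [hsplit, List.foldl_append, List.foldl_append]
  rw [pv_fold_keep_clean L1 p hne1 h1 z]
  simp only [List.foldl_cons]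
  have hstep : pvStep (p ++ L1.foldl pvStep z) (p, t)
      = t ++ pvStep (L1.foldl pvStep z) (p, t) := by
    rw [pvStep, pvStep]
    rw [pv_rep_match p t _ hp (List.prefix_append p _)]
    rw [List.drop_left]
  rw [hstep]
  have hz1 : ¬ pvUda <+: L1.foldl pvStep z := pv_uda_pres L1 hu1 z hz
  have hz2 : ¬ pvUda <+: pvStep (L1.foldl pvStep z) (p, t) := by
    intro hcon
    exact hz1 (pv_pullback p t hp (L1.foldl pvStep z).length pvUda _ hu0 le_rfl hcon)
  rw [pv_fold_keep_uda L2 t hne2 h2 hu2 _ hz2]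

lemma pv_good_tail (c : Char) (t : List Char) (h : pvGood (c :: t)) : pvGood t := by
  intro hcon
  exact h (hcon.trans (List.suffix_cons c t).isInfix)

lemma pv_good_drop (cs : List Char) (n : Nat) (h : pvGood cs) : pvGood (cs.drop n) := by
  intro hcon
  exact h (hcon.trans (List.drop_suffix n cs).isInfix)

lemma pv_seq_nil : pvSeq [] = [] := by decide

set_option maxHeartbeats 2000000 in
lemma pv_main : ∀ (n : Nat) (cs : List Char), cs.length ≤ n → pvGood cs → pvSeq cs = pvScan cs := by
  intro n
  induction n with
  | zero =>
    intro cs hlen _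
    have : cs = [] := by cases cs <;> simp_all
    subst this
    rw [pv_seq_nil, pvScan]
  | succ n ih =>
    intro cs hlen hgood
    cases cs with
    | nil => rw [pv_seq_nil, pvScan]
    | cons c t =>
      cases hf : pvTableB.find? (fun q => q.1.isPrefixOf (c :: t)) with
      | none =>
        rw [pvScan_none c t hf]
        have hnom : ∀ pt ∈ pvTableB, ¬ pt.1 <+: (c :: t) := by
          intro pt hpt hcon
          have := List.find?_eq_none.mp hf pt hpt
          exact this (List.isPrefixOf_iff_prefix.mpr hcon)
        unfold pvSeq
        rw [pv_fold_nomatch pvTableB (by decide) (by decide) c t hnom]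
        exact congrArg (c :: ·) (ih t (by simp at hlen; omega) (pv_good_tail c t hgood))
      | some pt =>
        have hmem := List.mem_of_find?_eq_some hf
        have hsome := List.find?_some hf
        have hpre : pt.1 <+: c :: t := List.isPrefixOf_iff_prefix.mp hsome
        clear hsome
        rw [pvScan_some c t pt hf]
        obtain ⟨z, hzeq⟩ := hpre
        rw [← hzeq, List.drop_left]
        have hpne : pt.1 ≠ [] := by
          have h1 : ∀ q ∈ pvTableB, q.1 ≠ [] := by decide
          exact h1 _ hmem
        have hlenz : z.length ≤ n := by
          rw [← hzeq, List.length_append] at hlen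
          have h1 : 1 ≤ pt.1.length := List.length_pos_of_ne_nil hpne
          omega
        have hgood' : pvGood (pt.1 ++ z) := by rw [hzeq]; exact hgood
        have hgz : pvGood z := by
          have := pv_good_drop (pt.1 ++ z) pt.1.length hgood'
          rwa [List.drop_left] at this
        clear hf hzeq hlen hgood hpne
        simp only [pvTableB, List.mem_cons, List.not_mem_nil, or_false] at hmem
        rcases hmem with rfl | rfl | rfl | rfl | rfl | rfl | rfl | rfl | rfl | rfl | rfl | rfl | rfl | rfl














        · rw [pv_case_clean _ _ [] [("cudaMalloc".toList, "hipMalloc".toList), ("cudaFree".toList, "hipFree".toList), ("cudaMemcpy".toList, "hipMemcpy".toList), ("cudaMemset".toList, "hipMemset".toList), ("cudaDeviceSynchronize".toList, "hipDeviceSynchronize".toList), ("cudaGetDeviceProperties".toList, "hipGetDeviceProperties".toList), ("cudaDeviceProp".toList, "hipDeviceProp_t".toList), ("cudaError_t".toList, "hipError_t".toList), ("cudaSuccess".toList, "hipSuccess".toList), ("cudaStream_t".toList, "hipStream_t".toList), ("cudaStreamCreate".toList, "hipStreamCreate".toList), ("cudaStreamDestroy".toList, "hipStreamDestroy".toList),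 ("cudaStreamSynchronize".toList, "hipStreamSynchronize".toList)] rfl (by decide) (by decide) (by decide) (by decide) (by decide) z]
          exact congrArg _ (ih z hlenz hgz)
        · have hz : ¬ pvUda <+: z := by
            intro hcon
            obtain ⟨w, hw⟩ := hcon
            apply hgood'
            refine List.IsPrefix.isInfix ⟨w, ?_⟩
            show "cudaMallocuda".toList ++ w = _
            rw [show ("cudaMallocuda".toList : List Char) = "cudaMalloc".toList ++ pvUda from by decide]
            rw [List.append_assoc, hw]
          rw [pv_case_uda _ _ [("#include <cuda_runtime.h>".toList, "#include <hip/hip_runtime.h>".toList)] [("cudaFree".toList, "hipFree".toList), ("cudaMemcpy".toList, "hipMemcpy".toList), ("cudaMemset".toList, "hipMemset".toList), ("cudaDeviceSynchronize".toList, "hipDeviceSynchronize".toList), ("cudaGetDeviceProperties".toList, "hipGetDeviceProperties".toList), ("cudaDeviceProp".toList, "hipDeviceProp_t".toList), ("cudaError_t".toList, "hipError_t".toList), ("cudaSuccess".toList, "hipSuccess".toList), ("cudaStream_t".toList, "hipStream_t".toList), ("cudaStreamCreate".toList, "hipStreamCreate".toList), ("cudaStreamDestroy".toList, "hipStreamDestroy".toList),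 ("cudaStreamSynchronize".toList, "hipStreamSynchronize".toList)] rfl (by decide) (by decide) (by decide) (by decide) (by decide) (by decide) (by decide) (by decide) z hz]
          exact congrArg _ (ih z hlenz hgz)
        · rw [pv_case_clean _ _ [("#include <cuda_runtime.h>".toList, "#include <hip/hip_runtime.h>".toList), ("cudaMalloc".toList, "hipMalloc".toList)] [("cudaMemcpy".toList, "hipMemcpy".toList), ("cudaMemset".toList, "hipMemset".toList), ("cudaDeviceSynchronize".toList, "hipDeviceSynchronize".toList), ("cudaGetDeviceProperties".toList, "hipGetDeviceProperties".toList), ("cudaDeviceProp".toList, "hipDeviceProp_t".toList), ("cudaError_t".toList, "hipError_t".toList), ("cudaSuccess".toList, "hipSuccess".toList), ("cudaStream_t".toList, "hipStream_t".toList), ("cudaStreamCreate".toList, "hipStreamCreate".toList), ("cudaStreamDestroy".toList, "hipStreamDestroy".toList), ("cudaStreamSynchronize".toList, "hipStreamSynchronize".toList)] rfl (by decide) (by decide) (by decide) (by decide) (by decide) z]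
          exact congrArg _ (ih z hlenz hgz)
        · rw [pv_case_clean _ _ [("#include <cuda_runtime.h>".toList, "#include <hip/hip_runtime.h>".toList), ("cudaMalloc".toList, "hipMalloc".toList), ("cudaFree".toList, "hipFree".toList)] [("cudaMemset".toList, "hipMemset".toList), ("cudaDeviceSynchronize".toList, "hipDeviceSynchronize".toList), ("cudaGetDeviceProperties".toList, "hipGetDeviceProperties".toList), ("cudaDeviceProp".toList, "hipDeviceProp_t".toList), ("cudaError_t".toList, "hipError_t".toList), ("cudaSuccess".toList, "hipSuccess".toList), ("cudaStream_t".toList, "hipStream_t".toList), ("cudaStreamCreate".toList, "hipStreamCreate".toList), ("cudaStreamDestroy".toList, "hipStreamDestroy".toList), ("cudaStreamSynchronize".toList, "hipStreamSynchronize".toList)] rfl (by decide) (by decide) (by decide) (by decide) (by decide) z]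
          exact congrArg _ (ih z hlenz hgz)
        · rw [pv_case_clean _ _ [("#include <cuda_runtime.h>".toList, "#include <hip/hip_runtime.h>".toList), ("cudaMalloc".toList, "hipMalloc".toList), ("cudaFree".toList, "hipFree".toList), ("cudaMemcpy".toList, "hipMemcpy".toList)] [("cudaDeviceSynchronize".toList, "hipDeviceSynchronize".toList), ("cudaGetDeviceProperties".toList, "hipGetDeviceProperties".toList), ("cudaDeviceProp".toList, "hipDeviceProp_t".toList), ("cudaError_t".toList, "hipError_t".toList), ("cudaSuccess".toList, "hipSuccess".toList), ("cudaStream_t".toList, "hipStream_t".toList), ("cudaStreamCreate".toList, "hipStreamCreate".toList), ("cudaStreamDestroy".toList, "hipStreamDestroy".toList), ("cudaStreamSynchronize".toList, "hipStreamSynchronize".toList)] rfl (by decide) (by decide) (by decide) (by decide) (by decide) z]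
          exact congrArg _ (ih z hlenz hgz)
        · rw [pv_case_clean _ _ [("#include <cuda_runtime.h>".toList, "#include <hip/hip_runtime.h>".toList), ("cudaMalloc".toList, "hipMalloc".toList), ("cudaFree".toList, "hipFree".toList), ("cudaMemcpy".toList, "hipMemcpy".toList), ("cudaMemset".toList, "hipMemset".toList)] [("cudaGetDeviceProperties".toList, "hipGetDeviceProperties".toList), ("cudaDeviceProp".toList, "hipDeviceProp_t".toList), ("cudaError_t".toList, "hipError_t".toList), ("cudaSuccess".toList, "hipSuccess".toList), ("cudaStream_t".toList, "hipStream_t".toList), ("cudaStreamCreate".toList, "hipStreamCreate".toList), ("cudaStreamDestroy".toList, "hipStreamDestroy".toList), ("cudaStreamSynchronize".toList, "hipStreamSynchronize".toList)] rfl (by decide) (by decide) (by decide) (by decide) (by decide) z]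
          exact congrArg _ (ih z hlenz hgz)
        · rw [pv_case_clean _ _ [("#include <cuda_runtime.h>".toList, "#include <hip/hip_runtime.h>".toList), ("cudaMalloc".toList, "hipMalloc".toList), ("cudaFree".toList, "hipFree".toList), ("cudaMemcpy".toList, "hipMemcpy".toList), ("cudaMemset".toList, "hipMemset".toList), ("cudaDeviceSynchronize".toList, "hipDeviceSynchronize".toList)] [("cudaDeviceProp".toList, "hipDeviceProp_t".toList), ("cudaError_t".toList, "hipError_t".toList), ("cudaSuccess".toList, "hipSuccess".toList), ("cudaStream_t".toList, "hipStream_t".toList), ("cudaStreamCreate".toList, "hipStreamCreate".toList), ("cudaStreamDestroy".toList, "hipStreamDestroy".toList), ("cudaStreamSynchronize".toList, "hipStreamSynchronize".toList)] rfl (by decide) (by decide) (by decide) (by decide) (by decide) z]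
          exact congrArg _ (ih z hlenz hgz)
        · rw [pv_case_clean _ _ [("#include <cuda_runtime.h>".toList, "#include <hip/hip_runtime.h>".toList), ("cudaMalloc".toList, "hipMalloc".toList), ("cudaFree".toList, "hipFree".toList), ("cudaMemcpy".toList, "hipMemcpy".toList), ("cudaMemset".toList, "hipMemset".toList), ("cudaDeviceSynchronize".toList, "hipDeviceSynchronize".toList), ("cudaGetDeviceProperties".toList, "hipGetDeviceProperties".toList)] [("cudaError_t".toList, "hipError_t".toList), ("cudaSuccess".toList, "hipSuccess".toList), ("cudaStream_t".toList, "hipStream_t".toList), ("cudaStreamCreate".toList, "hipStreamCreate".toList), ("cudaStreamDestroy".toList, "hipStreamDestroy".toList), ("cudaStreamSynchronize".toList, "hipStreamSynchronize".toList)] rfl (by decide) (by decide) (by decide) (by decide) (by decide) z]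
          exact congrArg _ (ih z hlenz hgz)
        · rw [pv_case_clean _ _ [("#include <cuda_runtime.h>".toList, "#include <hip/hip_runtime.h>".toList), ("cudaMalloc".toList, "hipMalloc".toList), ("cudaFree".toList, "hipFree".toList), ("cudaMemcpy".toList, "hipMemcpy".toList), ("cudaMemset".toList, "hipMemset".toList), ("cudaDeviceSynchronize".toList, "hipDeviceSynchronize".toList), ("cudaGetDeviceProperties".toList, "hipGetDeviceProperties".toList), ("cudaDeviceProp".toList, "hipDeviceProp_t".toList)] [("cudaSuccess".toList, "hipSuccess".toList), ("cudaStream_t".toList, "hipStream_t".toList), ("cudaStreamCreate".toList, "hipStreamCreate".toList), ("cudaStreamDestroy".toList, "hipStreamDestroy".toList), ("cudaStreamSynchronize".toList, "hipStreamSynchronize".toList)] rfl (by decide) (by decide) (by decide) (by decide) (by decide) z]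
          exact congrArg _ (ih z hlenz hgz)
        · rw [pv_case_clean _ _ [("#include <cuda_runtime.h>".toList, "#include <hip/hip_runtime.h>".toList), ("cudaMalloc".toList, "hipMalloc".toList), ("cudaFree".toList, "hipFree".toList), ("cudaMemcpy".toList, "hipMemcpy".toList), ("cudaMemset".toList, "hipMemset".toList), ("cudaDeviceSynchronize".toList, "hipDeviceSynchronize".toList), ("cudaGetDeviceProperties".toList, "hipGetDeviceProperties".toList), ("cudaDeviceProp".toList, "hipDeviceProp_t".toList), ("cudaError_t".toList, "hipError_t".toList)] [("cudaStream_t".toList, "hipStream_t".toList), ("cudaStreamCreate".toList, "hipStreamCreate".toList), ("cudaStreamDestroy".toList, "hipStreamDestroy".toList), ("cudaStreamSynchronize".toList, "hipStreamSynchronize".toList)] rfl (by decide) (by decide) (by decide) (by decide) (by decide) z]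
          exact congrArg _ (ih z hlenz hgz)
        · rw [pv_case_clean _ _ [("#include <cuda_runtime.h>".toList, "#include <hip/hip_runtime.h>".toList), ("cudaMalloc".toList, "hipMalloc".toList), ("cudaFree".toList, "hipFree".toList), ("cudaMemcpy".toList, "hipMemcpy".toList), ("cudaMemset".toList, "hipMemset".toList), ("cudaDeviceSynchronize".toList, "hipDeviceSynchronize".toList), ("cudaGetDeviceProperties".toList, "hipGetDeviceProperties".toList), ("cudaDeviceProp".toList, "hipDeviceProp_t".toList), ("cudaError_t".toList, "hipError_t".toList), ("cudaSuccess".toList, "hipSuccess".toList)] [("cudaStreamCreate".toList, "hipStreamCreate".toList), ("cudaStreamDestroy".toList, "hipStreamDestroy".toList), ("cudaStreamSynchronize".toList, "hipStreamSynchronize".toList)] rfl (by decide) (by decide) (by decide) (by decide) (by decide) z]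
          exact congrArg _ (ih z hlenz hgz)
        · rw [pv_case_clean _ _ [("#include <cuda_runtime.h>".toList, "#include <hip/hip_runtime.h>".toList), ("cudaMalloc".toList, "hipMalloc".toList), ("cudaFree".toList, "hipFree".toList), ("cudaMemcpy".toList, "hipMemcpy".toList), ("cudaMemset".toList, "hipMemset".toList), ("cudaDeviceSynchronize".toList, "hipDeviceSynchronize".toList), ("cudaGetDeviceProperties".toList, "hipGetDeviceProperties".toList), ("cudaDeviceProp".toList, "hipDeviceProp_t".toList), ("cudaError_t".toList, "hipError_t".toList), ("cudaSuccess".toList, "hipSuccess".toList), ("cudaStream_t".toList, "hipStream_t".toList)] [("cudaStreamDestroy".toList, "hipStreamDestroy".toList), ("cudaStreamSynchronize".toList, "hipStreamSynchronize".toList)] rfl (by decide) (by decide) (by decide) (by decide) (by decide) z]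
          exact congrArg _ (ih z hlenz hgz)
        · rw [pv_case_clean _ _ [("#include <cuda_runtime.h>".toList, "#include <hip/hip_runtime.h>".toList), ("cudaMalloc".toList, "hipMalloc".toList), ("cudaFree".toList, "hipFree".toList), ("cudaMemcpy".toList, "hipMemcpy".toList), ("cudaMemset".toList, "hipMemset".toList), ("cudaDeviceSynchronize".toList, "hipDeviceSynchronize".toList), ("cudaGetDeviceProperties".toList, "hipGetDeviceProperties".toList), ("cudaDeviceProp".toList, "hipDeviceProp_t".toList), ("cudaError_t".toList, "hipError_t".toList), ("cudaSuccess".toList, "hipSuccess".toList), ("cudaStream_t".toList, "hipStream_t".toList), ("cudaStreamCreate".toList, "hipStreamCreate".toList)] [("cudaStreamSynchronize".toList, "hipStreamSynchronize".toList)] rfl (by decide) (by decide) (by decide) (by decide) (by decide) z]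
          exact congrArg _ (ih z hlenz hgz)
        · rw [pv_case_clean _ _ [("#include <cuda_runtime.h>".toList, "#include <hip/hip_runtime.h>".toList), ("cudaMalloc".toList, "hipMalloc".toList), ("cudaFree".toList, "hipFree".toList), ("cudaMemcpy".toList, "hipMemcpy".toList), ("cudaMemset".toList, "hipMemset".toList), ("cudaDeviceSynchronize".toList, "hipDeviceSynchronize".toList), ("cudaGetDeviceProperties".toList, "hipGetDeviceProperties".toList), ("cudaDeviceProp".toList, "hipDeviceProp_t".toList), ("cudaError_t".toList, "hipError_t".toList), ("cudaSuccess".toList, "hipSuccess".toList), ("cudaStream_t".toList, "hipStream_t".toList), ("cudaStreamCreate".toList, "hipStreamCreate".toList), ("cudaStreamDestroy".toList, "hipStreamDestroy".toList)] [] rfl (by decide) (by decide) (by decide) (by decide) (by decide) z]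
          exact congrArg _ (ih z hlenz hgz)
lemma pv_str_fold (L : List (String × String)) : ∀ (s : String),
    (L.foldl (fun s pt => PySem.Str.replace s pt.1 pt.2) s).toList
      = (L.map (fun pt => (pt.1.toList, pt.2.toList))).foldl pvStep s.toList := by
  induction L with
  | nil => intro s; simp
  | cons a L ih =>
    intro s
    simp only [List.foldl_cons, List.map_cons]
    rw [ih]
    congr 1
    rw [pvStep, PySem.Str.toList_replace]

lemma pv_join_cons_ne (sep x : List Char) (rest : List (List Char)) (hx : x ≠ []) :
    PySem.Chars.join sep (x :: rest) ≠ [] := by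
  unfold PySem.Chars.join
  cases rest with
  | nil => simpa [List.intercalate] using hx
  | cons y r =>
    rw [List.intercalate, List.intersperse_cons₂]
    simp [hx]

lemma pv_line_ne (w : String) :
    (PySem.Str.join "" ["// ⚠️ WARNING: ", w]).toList ≠ [] := by
  rw [PySem.Str.toList_join]
  simp only [List.map_cons, List.map_nil]
  exact pv_join_cons_ne _ _ _ (by decide)

lemma pv_banner_empty (warnings : List String) :
    (PySem.Str.join "\n" (warnings.map (fun w => PySem.Str.join "" ["// ⚠️ WARNING: ", w])) = "")
      ↔ warnings = [] := by
  cases warnings with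
  | nil => exact ⟨fun _ => rfl, fun _ => rfl⟩
  | cons w ws =>
    constructor
    · intro h
      exfalso
      have h' := congrArg String.toList h
      rw [PySem.Str.toList_join] at h'
      simp only [List.map_cons] at h'
      exact pv_join_cons_ne _ _ _ (pv_line_ne w) h'
    · intro h; exact absurd h (by simp)

-- ===== VERDICT (by name: the statement is the Claim_ definition above) =====
theorem convert_cuda_to_hip_spec : Claim_equal_convert_cuda_to_hip := by
  unfold Claim_equal_convert_cuda_to_hip
  intro cuda_code warnings _ hpre
  unfold Spec_convert_cuda_to_hip convert_cuda_to_hip convert_cuda_to_hip_alt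
  have hgood : pvGood cuda_code.toList := by
    unfold Pre_convert_cuda_to_hip at hpre
    rw [PySem.Str.isIn] at hpre
    exact (PySem.Chars.isIn_eq_false_iff _ _).mp hpre
  have hip_eq : pvReplacementsA.foldl (fun s pt => PySem.Str.replace s pt.1 pt.2) cuda_code
      = String.ofList (pvScan cuda_code.toList) := by
    have h1 := pv_str_fold pvReplacementsA cuda_code
    rw [show pvReplacementsA.map (fun pt => (pt.1.toList, pt.2.toList)) = pvTableB from rfl] at h1
    have h3 := pv_main cuda_code.toList.length cuda_code.toList le_rfl hgood
    rw [pvSeq] at h3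
    have h4 := congrArg String.ofList (h1.trans h3)
    rwa [String.ofList_toList] at h4
  rw [hip_eq]
  by_cases hws : warnings = []
  · subst hws
    simp [show PySem.Str.join "\n" ([] : List String) = "" from rfl]
  · have hb : ¬ (PySem.Str.join "\n" (warnings.map (fun w => PySem.Str.join "" ["// ⚠️ WARNING: ", w])) = "") :=
      fun h => hws ((pv_banner_empty warnings).mp h)
    simp [hb, hws]
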